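-- pv_equiv track=rewrite | github.com/miliar/Code_Jam_Webscraper | solutions_python/Problem_155/1441.py | solve
-- ===== SOURCE A (Python) =====
-- def solve(smax, nums):
--     clap = 0
--     invite = 0
--     for i, count in enumerate(nums):
--         count = int(count)
--         if clap < i:
--             needs = i - clap
--             invite += needs
--             clap += needs
--         clap += count
--     return invite
-- ===== SOURCE B (Python) =====
-- def solve(smax, nums):
--     prefixes = []
--     total = 0
--     for c in nums:
--         prefixes.append(total)
--         total += int(c)
--     return max([0] + [i - p for i, p in enumerate(prefixes)])
-- ===== Notes on version B (the rewrite author's own statement) =====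
-- stated objective: alternative
-- what changed: Replaces A's clap/invite top-up simulation with two stages: first build the list of raw prefix sums of the counts, then return the maximum (floored at 0) of the deficits i - prefix_sum[i] over all indices.
import Mathlib
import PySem

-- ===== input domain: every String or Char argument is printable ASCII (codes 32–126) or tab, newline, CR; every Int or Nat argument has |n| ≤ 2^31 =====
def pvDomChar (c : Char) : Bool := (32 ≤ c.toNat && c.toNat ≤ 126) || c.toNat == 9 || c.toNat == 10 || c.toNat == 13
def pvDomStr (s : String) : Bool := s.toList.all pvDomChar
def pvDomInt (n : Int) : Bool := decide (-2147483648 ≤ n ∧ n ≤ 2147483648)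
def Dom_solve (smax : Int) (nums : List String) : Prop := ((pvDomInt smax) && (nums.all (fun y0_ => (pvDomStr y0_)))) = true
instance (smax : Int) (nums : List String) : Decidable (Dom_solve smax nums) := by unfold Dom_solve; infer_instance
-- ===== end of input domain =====

-- B replaces A's clap/invite top-up simulation with two stages: build the list of raw
-- prefix sums, then take the maximum (floored at 0) of the deficits i - prefix_sum[i].

-- ===== PORT A =====
-- int(count) defaults to 0 here; Pre_solve excludes the inputs where Python's int() raises.
def solve (smax : Int) (nums : List String) : Int :=
  let r := (PySem.List.enumerate nums).foldl
    (fun (st : Int × Int) (p : Int × String) =>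
      let clap := st.1
      let invite := st.2
      let count := (PySem.Int.ofStr? p.2).getD 0
      let (clap, invite) :=
        if clap < p.1 then
          let needs := p.1 - clap
          (clap + needs, invite + needs)
        else (clap, invite)
      (clap + count, invite))
    (0, 0)
  r.2

-- ===== PORT B =====
-- stage 1: the prefixes list and the running total; stage 2: Python's max over the
-- nonempty literal list [0] + deficits (max? returns some on a cons; getD 0 extracts it).
def solve_alt (smax : Int) (nums : List String) : Int :=
  let st := nums.foldl
    (fun (st : List Int × Int) (c : String) =>
      (st.1 ++ [st.2], st.2 + (PySem.Int.ofStr? c).getD 0))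
    ([], 0)
  (PySem.List.max?
      ((0 : Int) :: (PySem.List.enumerate st.1).map (fun p => p.1 - p.2))
      (fun y => y)).getD 0

-- ===== PRECONDITION & SPEC =====
-- Pre_ excludes exactly the inputs where int(count) raises ValueError in both A and B.
def Pre_solve (smax : Int) (nums : List String) : Prop :=
  ∀ s ∈ nums, (PySem.Int.ofStr? s).isSome
instance (smax : Int) (nums : List String) : Decidable (Pre_solve smax nums) := by
  unfold Pre_solve; infer_instance

def pvWitness_solve : Int × List String := (100, ["1", "0", "3"])

def Spec_solve (smax : Int) (nums : List String) (out : Int) : Prop := out = solve_alt smax nums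
instance (smax : Int) (nums : List String) (out : Int) : Decidable (Spec_solve smax nums out) := by unfold Spec_solve; infer_instance

-- ===== CLAIM (what is proved, stated in full; the proofs are below) =====
def Claim_equal_solve : Prop := ∀ (smax : Int) (nums : List String), Dom_solve smax nums → Pre_solve smax nums → Spec_solve smax nums (solve smax nums)

-- ===== LEMMAS AND PROOFS =====

-- B's stage-2 value on a prefixes list: the running max, seeded with 0, of the deficits.
def defMax (ps : List Int) : Int :=
  ((PySem.List.enumerate ps).map (fun p => p.1 - p.2)).foldl max 0

theorem defMax_append (ps : List Int) (x : Int) :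
    defMax (ps ++ [x]) = max (defMax ps) ((ps.length : Int) - x) := by
  unfold defMax
  rw [PySem.List.enumerate_append]
  simp [PySem.List.enumerate_cons, List.foldl_append]

-- Invariant between A's state (clap, invite) and B's stage-1 state (prefixes, total):
-- invite = defMax prefixes, clap = total + invite, and A's enumerate index equals
-- the length of the prefixes built so far.
theorem fold_rel (l : List String) (ps : List Int) (total invite : Int)
    (h1 : invite = defMax ps) :
    let fA := fun (st : Int × Int) (p : Int × String) =>
      let clap := st.1
      let invite := st.2
      let count := (PySem.Int.ofStr? p.2).getD 0
      let (clap, invite) :=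
        if clap < p.1 then
          let needs := p.1 - clap
          (clap + needs, invite + needs)
        else (clap, invite)
      (clap + count, invite)
    let fB := fun (st : List Int × Int) (c : String) =>
      (st.1 ++ [st.2], st.2 + (PySem.Int.ofStr? c).getD 0)
    ((PySem.List.enumerate l (ps.length : Int)).foldl fA (total + invite, invite)).2
      = defMax ((l.foldl fB (ps, total)).1) := by
  intro fA fB
  induction l generalizing ps total invite with
  | nil => simpa [PySem.List.enumerate_nil] using h1
  | cons c t ih =>
    rw [PySem.List.enumerate_cons, List.foldl_cons, List.foldl_cons]
    have hstep : fA (total + invite, invite) ((ps.length : Int), c)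
        = ((total + (PySem.Int.ofStr? c).getD 0)
            + max invite ((ps.length : Int) - total),
           max invite ((ps.length : Int) - total)) := by
      simp only [fA]
      split_ifs with h <;> simp <;> constructor <;> omega
    have hlen : ((ps.length : Int) + 1) = (((ps ++ [total]).length : Int)) := by
      simp
    rw [hstep, hlen]
    have h1' : max invite ((ps.length : Int) - total) = defMax (ps ++ [total]) := by
      rw [defMax_append, h1]
    exact ih (ps ++ [total]) (total + (PySem.Int.ofStr? c).getD 0) _ h1'

-- ===== VERDICT (by name: the statement is the Claim_ definition above) =====
theorem solve_spec : Claim_equal_solve := by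
  intro smax nums _ _
  unfold Spec_solve solve solve_alt
  have h := fold_rel nums [] 0 0 (by simp [defMax, PySem.List.enumerate_nil])
  simp only [List.length_nil, Int.natCast_zero, add_zero] at h
  simp only [PySem.List.max?_id_cons, Option.getD_some]
  simpa [defMax] using h
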